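-- pv_equiv track=rewrite | github.com/anthonynguyen2021/NonLeetCode | SquareOfZeros/recursionOptimized.py | preComputeNumberOfZeros
-- ===== SOURCE A (Python) =====
-- def preComputeNumberOfZeros(matrix):
--
-- 	infoMatrix = [[x for x in row] for row in matrix]
-- 	n = len(infoMatrix)
--
-- 	for row in range(n):
-- 		for col in range(n):
-- 			numZeros = 1 if matrix[row][col] == 0 else 0
-- 			infoMatrix[row][col] = {"numZerosRight": numZeros, "numZerosBelow": numZeros}
--
-- 	for row in reversed(range(n)):
-- 		for col in reversed(range(n)):
--
-- 			if matrix[row][col] == 1: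
-- 				continue
-- 			if row < n - 1:
-- 				infoMatrix[row][col]["numZerosBelow"] += infoMatrix[row+1][col]["numZerosBelow"]
-- 			if col < n - 1:
-- 				infoMatrix[row][col]["numZerosRight"] += infoMatrix[row][col+1]["numZerosRight"]
--
-- 	return infoMatrix
-- ===== SOURCE B (Python) =====
-- def preComputeNumberOfZeros(matrix):
-- 	n = len(matrix)
--
-- 	def suffix_runs(line):
-- 		# counts[i] = number of consecutive zeros starting at i (a 1 resets the run)
-- 		counts = []
-- 		run = 0
-- 		for v in reversed(line):
-- 			if v == 1:
-- 				run = 0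
-- 			elif v == 0:
-- 				run += 1
-- 			counts.append(run)
-- 		counts.reverse()
-- 		return counts
--
-- 	right = [suffix_runs(row) for row in matrix]
-- 	below = [suffix_runs([matrix[r][c] for r in range(n)]) for c in range(n)]
--
-- 	return [[{"numZerosRight": right[r][c], "numZerosBelow": below[c][r]}
-- 			 for c, _ in enumerate(row)] for r, row in enumerate(matrix)]
-- ===== Notes on version B (the rewrite author's own statement) =====
-- stated objective: alternative
-- what changed: Replaces A's copy-then-mutate double reverse pass over a grid of dicts with two independent one-dimensional suffix scans (one per row for numZerosRight, one per column for numZerosBelow) assembled into fresh cells; Pre_ excludes non-square matrices, on which A raises IndexError (short rows) or returns raw ints mixed into its output (long rows, not a value of the declared type).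
-- outside the precondition, e.g. on preComputeNumberOfZeros([[1, 2]]): A returns [[{'numZerosRight': 0, 'numZerosBelow': 0}, 2]], B raises IndexError; on preComputeNumberOfZeros([[0], [0, 0]]): A raises IndexError, B raises IndexError
import Mathlib
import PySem

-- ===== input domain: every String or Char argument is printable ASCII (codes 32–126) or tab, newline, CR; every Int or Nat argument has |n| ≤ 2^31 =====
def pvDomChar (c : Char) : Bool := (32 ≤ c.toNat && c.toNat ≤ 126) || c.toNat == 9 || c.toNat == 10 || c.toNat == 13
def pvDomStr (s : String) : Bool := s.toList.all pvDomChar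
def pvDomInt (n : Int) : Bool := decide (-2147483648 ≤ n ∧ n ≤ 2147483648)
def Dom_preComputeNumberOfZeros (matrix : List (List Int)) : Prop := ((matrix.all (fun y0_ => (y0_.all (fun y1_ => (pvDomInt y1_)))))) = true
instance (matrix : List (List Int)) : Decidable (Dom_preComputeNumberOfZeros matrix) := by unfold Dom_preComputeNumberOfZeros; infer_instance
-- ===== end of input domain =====

-- B replaces A's copy-then-mutate double reverse pass with two independent 1-D suffix
-- scans (per row / per column) assembled into fresh cells; alternative decomposition, same cost.

abbrev pvGrid := List (List (List (String × Int)))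

-- ===== PORT A =====
-- infoMatrix[row][col] = v  (row, col produced by range, hence nonnegative and, under Pre_, in range)
def pvSetCell (g : pvGrid) (r c : Nat) (v : List (String × Int)) : pvGrid :=
  g.set r ((g.getD r []).set c v)

-- body of A's first loop: {"numZerosRight": numZeros, "numZerosBelow": numZeros}
def pvInitCell (matrix : List (List Int)) (row col : Nat) : List (String × Int) :=
  let numZeros : Int := if (matrix.getD row []).getD col 0 = 0 then 1 else 0
  (PySem.Dict.insert (PySem.Dict.insert (PySem.Dict.mk [])
    "numZerosRight" numZeros) "numZerosBelow" numZeros).items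

-- body of A's second loop (one (row, col) iteration; one helper per in-place dict update)
def pvBody2B (_matrix : List (List Int)) (n : Nat) (info : pvGrid) (row col : Nat) : pvGrid :=
  if row < n - 1 then
    pvSetCell info row col
      (PySem.Dict.insert (PySem.Dict.mk ((info.getD row []).getD col []))
        "numZerosBelow"
        ((PySem.Dict.getD (PySem.Dict.mk ((info.getD row []).getD col [])) "numZerosBelow" 0) +
         (PySem.Dict.getD (PySem.Dict.mk ((info.getD (row+1) []).getD col [])) "numZerosBelow" 0))).items
  else info

def pvBody2R (_matrix : List (List Int)) (n : Nat) (info : pvGrid) (row col : Nat) : pvGrid :=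
  if col < n - 1 then
    pvSetCell info row col
      (PySem.Dict.insert (PySem.Dict.mk ((info.getD row []).getD col []))
        "numZerosRight"
        ((PySem.Dict.getD (PySem.Dict.mk ((info.getD row []).getD col [])) "numZerosRight" 0) +
         (PySem.Dict.getD (PySem.Dict.mk ((info.getD row []).getD (col+1) [])) "numZerosRight" 0))).items
  else info

def pvBody2 (matrix : List (List Int)) (n : Nat) (info : pvGrid) (row col : Nat) : pvGrid :=
  if (matrix.getD row []).getD col 0 = 1 then info
  else pvBody2R matrix n (pvBody2B matrix n info row col) row col

def preComputeNumberOfZeros (matrix : List (List Int)) : List (List (List (String × Int))) :=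
  -- infoMatrix = [[x for x in row] for row in matrix]: a same-shape copy whose int entries are
  -- all overwritten by the first loop under Pre_ (placeholder [] cells here; only non-square
  -- input, excluded by Pre_, could ever expose them)
  let info0 : pvGrid := matrix.map (fun row => row.map (fun _ => []))
  let n := info0.length
  let info1 := (List.range n).foldl (fun info row =>
    (List.range n).foldl (fun info col => pvSetCell info row col (pvInitCell matrix row col)) info) info0
  ((List.range n).reverse).foldl (fun info row =>
    ((List.range n).reverse).foldl (fun info col => pvBody2 matrix n info row col) info) info1

-- ===== PORT B =====
-- suffix_runs(line): right-to-left running count (a 1 resets, a 0 increments),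
-- appended then reversed — as in Source B
def pvScanStep (st : List Int × Int) (v : Int) : List Int × Int :=
  let run : Int := if v = 1 then 0 else if v = 0 then st.2 + 1 else st.2
  (st.1 ++ [run], run)

def pvScan (line : List Int) : List Int :=
  (line.reverse.foldl pvScanStep ([], 0)).1.reverse

def preComputeNumberOfZeros_alt (matrix : List (List Int)) : List (List (List (String × Int))) :=
  let n := matrix.length
  let right := matrix.map (fun row => pvScan row)
  let below := (List.range n).map (fun c =>
    pvScan ((List.range n).map (fun r => (matrix.getD r []).getD c 0)))
  -- enumerate indices are nonnegative, so .toNat is exact; below[c][r] is in range under Pre_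
  (PySem.List.enumerate matrix 0).map (fun rr =>
    (PySem.List.enumerate rr.2 0).map (fun cc =>
      [("numZerosRight", (right.getD rr.1.toNat []).getD cc.1.toNat 0),
       ("numZerosBelow", (below.getD cc.1.toNat []).getD rr.1.toNat 0)]))

-- ===== PRECONDITION & SPEC =====
-- Pre_ excludes non-square matrices: a row shorter than len(matrix) makes A raise IndexError,
-- and a longer row leaves raw ints (not dicts) in A's output, outside the declared return type
-- (B raises IndexError on those long-row inputs).
def Pre_preComputeNumberOfZeros (matrix : List (List Int)) : Prop :=
  ∀ row ∈ matrix, row.length = matrix.length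
instance (matrix : List (List Int)) : Decidable (Pre_preComputeNumberOfZeros matrix) := by
  unfold Pre_preComputeNumberOfZeros; infer_instance

def pvWitness_preComputeNumberOfZeros : List (List Int) := [[0, 0], [1, 0]]

def Spec_preComputeNumberOfZeros (matrix : List (List Int)) (out : List (List (List (String × Int)))) : Prop := out = preComputeNumberOfZeros_alt matrix
instance (matrix : List (List Int)) (out : List (List (List (String × Int)))) : Decidable (Spec_preComputeNumberOfZeros matrix out) := by unfold Spec_preComputeNumberOfZeros; infer_instance

-- ===== CLAIM (what is proved, stated in full; the proofs are below) =====
def Claim_equal_preComputeNumberOfZeros : Prop := ∀ (matrix : List (List Int)), Dom_preComputeNumberOfZeros matrix → Pre_preComputeNumberOfZeros matrix → Spec_preComputeNumberOfZeros matrix (preComputeNumberOfZeros matrix)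

-- ===== LEMMAS AND PROOFS =====

-- ---- abbreviations for the common values ----
def pvM (matrix : List (List Int)) (r c : Nat) : Int := (matrix.getD r []).getD c 0
def pvZv (matrix : List (List Int)) (r c : Nat) : Int := if pvM matrix r c = 0 then 1 else 0
def pvBase (matrix : List (List Int)) (r c : Nat) : List (String × Int) :=
  [("numZerosRight", pvZv matrix r c), ("numZerosBelow", pvZv matrix r c)]
def pvCol (matrix : List (List Int)) (c : Nat) : List Int :=
  (List.range matrix.length).map (fun r => pvM matrix r c)
def pvSR : List Int → List Int
  | [] => []
  | v :: rest => (if v = 1 then 0 else (if v = 0 then (1:Int) else 0) + (pvSR rest).headD 0) :: pvSR rest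
def pvF (matrix : List (List Int)) (r c : Nat) : List (String × Int) :=
  [("numZerosRight", (pvSR (matrix.getD r [])).getD c 0),
   ("numZerosBelow", (pvSR (pvCol matrix c)).getD r 0)]
def pvGridIs (n : Nat) (G : pvGrid) (f : Nat → Nat → List (String × Int)) : Prop :=
  G.length = n ∧ (∀ row ∈ G, row.length = n) ∧
  ∀ i j, i < n → j < n → (G.getD i []).getD j [] = f i j
def pvMixI (matrix : List (List Int)) (r c i j : Nat) : List (String × Int) :=
  if r < i ∨ (r = i ∧ c ≤ j) then pvF matrix i j else pvBase matrix i j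
def pvMixO (matrix : List (List Int)) (a i j : Nat) : List (String × Int) :=
  if a ≤ i then pvF matrix i j else pvBase matrix i j

-- ---- generic list lemmas ----
theorem pv_getD_set {α : Type} (l : List α) (i j : Nat) (v d : α) :
    (l.set i v).getD j d = if i = j ∧ j < l.length then v else l.getD j d := by
  simp only [List.getD_eq_getElem?_getD, List.getElem?_set]
  split_ifs with h1 h2 <;> simp_all

theorem pv_getD_default {α : Type} (l : List α) (k : Nat) (d : α) (h : l.length ≤ k) :
    l.getD k d = d := by
  simp [List.getD_eq_getElem?_getD, List.getElem?_eq_none h]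

theorem pv_set_getD_self {α : Type} (l : List α) (i : Nat) (d : α) (h : i < l.length) :
    l.set i (l.getD i d) = l := by
  rw [List.getD_eq_getElem l _ h]; exact List.set_getElem_self h

theorem pv_getD_mem {α : Type} (l : List α) (i : Nat) (d : α) (h : i < l.length) :
    l.getD i d ∈ l := by
  rw [List.getD_eq_getElem l _ h]; exact List.getElem_mem h

-- ---- pvScan = pvSR ----
theorem pvScan_snd (l : List Int) (st : List Int × Int) (h : st.2 = st.1.reverse.headD 0) :
    (l.foldl pvScanStep st).2 = (l.foldl pvScanStep st).1.reverse.headD 0 := by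
  induction l generalizing st with
  | nil => exact h
  | cons v rest ih =>
    apply ih
    simp [pvScanStep]

theorem pvScan_cons (v : Int) (rest : List Int) :
    pvScan (v :: rest) =
      (if v = 1 then 0 else if v = 0 then (pvScan rest).headD 0 + 1 else (pvScan rest).headD 0)
        :: pvScan rest := by
  have h := pvScan_snd rest.reverse ([], 0) (by simp)
  unfold pvScan
  rw [List.reverse_cons, List.foldl_append]
  simp only [List.foldl_cons, List.foldl_nil, pvScanStep, List.reverse_append,
    List.reverse_cons, List.reverse_nil, List.nil_append, List.cons_append]
  simp only [h]

theorem pvScan_eq_sr (l : List Int) : pvScan l = pvSR l := by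
  induction l with
  | nil => rfl
  | cons v rest ih =>
    rw [pvScan_cons, ih, pvSR]
    congr 1
    split_ifs <;> omega

theorem pvSR_length (l : List Int) : (pvSR l).length = l.length := by
  induction l with
  | nil => rfl
  | cons v rest ih => simp [pvSR, ih]

theorem pvSR_getD (l : List Int) (c : Nat) (h : c < l.length) :
    (pvSR l).getD c 0 =
      if l.getD c 0 = 1 then 0
      else (if l.getD c 0 = 0 then (1:Int) else 0) + (pvSR l).getD (c+1) 0 := by
  induction l generalizing c with
  | nil => simp at h
  | cons v rest ih =>
    cases c with
    | zero =>
      have hh : (pvSR rest).head?.getD 0 = (pvSR rest)[0]?.getD 0 := by cases (pvSR rest) <;> simp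
      simp [pvSR, List.getD_eq_getElem?_getD, hh]
    | succ c =>
      have hc : c < rest.length := by simpa using h
      simpa [pvSR] using ih c hc

-- ---- first loop characterization ----
theorem pvGridIs_congr (n : Nat) (G : pvGrid) (f g : Nat → Nat → List (String × Int))
    (hG : pvGridIs n G f) (h : ∀ i j, i < n → j < n → f i j = g i j) : pvGridIs n G g := by
  obtain ⟨h1, h2, h3⟩ := hG
  exact ⟨h1, h2, fun i j hi hj => (h3 i j hi hj).trans (h i j hi hj)⟩

theorem pv_row_fold_getD (cellf : Nat → List (String × Int)) (is : List Nat)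
    (l : List (List (String × Int))) (j : Nat) (d : List (String × Int)) :
    (is.foldl (fun row c => row.set c (cellf c)) l).getD j d
      = if j ∈ is ∧ j < l.length then cellf j else l.getD j d := by
  induction is generalizing l with
  | nil => simp
  | cons i is ih =>
    rw [List.foldl_cons, ih]
    rw [List.length_set, pv_getD_set]
    by_cases h1 : j ∈ is <;> by_cases h2 : j < l.length <;> by_cases h3 : i = j <;>
      simp_all [List.mem_cons] <;> omega

theorem pv_row_fold_length (cellf : Nat → List (String × Int)) (is : List Nat)
    (l : List (List (String × Int))) :
    (is.foldl (fun row c => row.set c (cellf c)) l).length = l.length := by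
  induction is generalizing l with
  | nil => rfl
  | cons i is ih => simp [List.foldl_cons, ih]

theorem pv_inner_fold_eq (cellf : Nat → List (String × Int)) (is : List Nat)
    (info : pvGrid) (r : Nat) (hr : r < info.length) :
    is.foldl (fun info c => pvSetCell info r c (cellf c)) info
      = info.set r (is.foldl (fun row c => row.set c (cellf c)) (info.getD r [])) := by
  induction is generalizing info with
  | nil => rw [List.foldl_nil, List.foldl_nil, pv_set_getD_self _ _ _ hr]
  | cons i is ih =>
    rw [List.foldl_cons, List.foldl_cons]
    have hr' : r < (pvSetCell info r i (cellf i)).length := by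
      simpa [pvSetCell] using hr
    rw [ih _ hr']
    unfold pvSetCell
    rw [List.set_set]
    congr 1
    rw [pv_getD_set]
    simp [hr]

theorem pv_loop1 (matrix : List (List Int)) (n : Nat) (js : List Nat) (info : pvGrid)
    (hlen : info.length = n) (hrows : ∀ row ∈ info, row.length = n) (hjs : ∀ r ∈ js, r < n) :
    pvGridIs n
      (js.foldl (fun info row =>
        (List.range n).foldl (fun info col => pvSetCell info row col (pvInitCell matrix row col)) info) info)
      (fun i j => if i ∈ js then pvInitCell matrix i j else (info.getD i []).getD j []) := by
  induction js generalizing info with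
  | nil => exact ⟨hlen, hrows, fun i j hi hj => by simp⟩
  | cons r js ih =>
    have hrn : r < n := hjs r (List.mem_cons_self)
    have hrG : r < info.length := hlen ▸ hrn
    rw [List.foldl_cons, pv_inner_fold_eq _ _ _ _ hrG]
    set w := (List.range n).foldl (fun row c => row.set c (pvInitCell matrix r c)) (info.getD r []) with hw
    have hwlen : w.length = n := by
      rw [hw, pv_row_fold_length]
      exact hrows _ (pv_getD_mem _ _ _ hrG)
    have hlen' : (info.set r w).length = n := by simpa using hlen
    have hrows' : ∀ row ∈ info.set r w, row.length = n := by
      intro row hrow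
      rcases List.mem_or_eq_of_mem_set hrow with h | h
      · exact hrows _ h
      · exact h ▸ hwlen
    have := ih (info.set r w) hlen' hrows' (fun x hx => hjs x (List.mem_cons_of_mem _ hx))
    apply pvGridIs_congr _ _ _ _ this
    intro i j hi hj
    by_cases h1 : i ∈ js
    · simp [h1]
    · rw [if_neg h1, pv_getD_set]
      by_cases h2 : r = i
      · subst h2
        rw [if_pos ⟨rfl, hrG⟩, hw, pv_row_fold_getD]
        have : (info.getD r []).length = n := hrows _ (pv_getD_mem _ _ _ hrG)
        simp only [List.getD_eq_getElem?_getD] at this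
        simp [this, hj]
      · rw [if_neg (fun h => h2 h.1), if_neg (by simp [List.mem_cons, h1]; omega)]

-- ---- second loop characterization ----
theorem pvGridIs_set (n : Nat) (G : pvGrid) (f : Nat → Nat → List (String × Int))
    (r c : Nat) (v : List (String × Int)) (hG : pvGridIs n G f) (hr : r < n) (_hc : c < n) :
    pvGridIs n (pvSetCell G r c v) (fun i j => if r = i ∧ c = j then v else f i j) := by
  obtain ⟨h1, h2, h3⟩ := hG
  have hrG : r < G.length := h1 ▸ hr
  have hrowlen : (G.getD r []).length = n := h2 _ (pv_getD_mem _ _ _ hrG)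
  refine ⟨by simpa [pvSetCell] using h1, ?_, ?_⟩
  · intro row hrow
    unfold pvSetCell at hrow
    rcases List.mem_or_eq_of_mem_set hrow with h | h
    · exact h2 _ h
    · subst h; simpa using hrowlen
  · intro i j hi hj
    unfold pvSetCell
    rw [pv_getD_set]
    by_cases hri : r = i
    · subst hri
      rw [if_pos ⟨rfl, hrG⟩]
      rw [pv_getD_set, hrowlen]
      by_cases hcj : c = j
      · simp [hcj, hj]
      · have := h3 r j hi hj
        simp only [List.getD_eq_getElem?_getD] at this
        simp [hcj, this]
    · have := h3 i j hi hj
      simp only [List.getD_eq_getElem?_getD] at this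
      simp [hri, this]

-- ---- cell values along the second loop ----
def pvCellMid (matrix : List (List Int)) (r c : Nat) : List (String × Int) :=
  [("numZerosRight", pvZv matrix r c),
   ("numZerosBelow", pvZv matrix r c + (pvSR (pvCol matrix c)).getD (r+1) 0)]
def pvCellFin (matrix : List (List Int)) (r c : Nat) : List (String × Int) :=
  [("numZerosRight", pvZv matrix r c + (pvSR (matrix.getD r [])).getD (c+1) 0),
   ("numZerosBelow", pvZv matrix r c + (pvSR (pvCol matrix c)).getD (r+1) 0)]

theorem pv_dict_getR (a b : Int) :
    PySem.Dict.getD (PySem.Dict.mk [("numZerosRight",a),("numZerosBelow",b)]) "numZerosRight" 0 = a := rfl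
theorem pv_dict_getB (a b : Int) :
    PySem.Dict.getD (PySem.Dict.mk [("numZerosRight",a),("numZerosBelow",b)]) "numZerosBelow" 0 = b := rfl
theorem pv_dict_insR (a b x : Int) :
    (PySem.Dict.insert (PySem.Dict.mk [("numZerosRight",a),("numZerosBelow",b)]) "numZerosRight" x).items
      = [("numZerosRight",x),("numZerosBelow",b)] := rfl
theorem pv_dict_insB (a b x : Int) :
    (PySem.Dict.insert (PySem.Dict.mk [("numZerosRight",a),("numZerosBelow",b)]) "numZerosBelow" x).items
      = [("numZerosRight",a),("numZerosBelow",x)] := rfl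

theorem pv_getD_map {α β : Type} (l : List α) (f : α → β) (i : Nat) (d : β) (d' : α)
    (h : i < l.length) : (l.map f).getD i d = f (l.getD i d') := by
  rw [List.getD_eq_getElem _ _ (by simpa using h), List.getD_eq_getElem _ _ h, List.getElem_map]

theorem pv_col_length (matrix : List (List Int)) (c : Nat) :
    (pvCol matrix c).length = matrix.length := by simp [pvCol]

theorem pv_col_getD (matrix : List (List Int)) (r c : Nat) (h : r < matrix.length) :
    (pvCol matrix c).getD r 0 = pvM matrix r c := by
  unfold pvCol
  rw [pv_getD_map _ _ _ _ 0 (by simpa using h)]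
  rw [List.getD_eq_getElem _ _ (by simpa using h)]
  simp

theorem pv_rowlen (matrix : List (List Int)) (hp : Pre_preComputeNumberOfZeros matrix)
    (r : Nat) (hr : r < matrix.length) : (matrix.getD r []).length = matrix.length :=
  hp _ (pv_getD_mem _ _ _ hr)

-- the two suffix-scan recurrences, phrased as A's second loop computes them
theorem pv_Rv_rec (matrix : List (List Int)) (hp : Pre_preComputeNumberOfZeros matrix)
    (r c : Nat) (hr : r < matrix.length) (hc : c < matrix.length) (hM : pvM matrix r c ≠ 1) :
    (pvSR (matrix.getD r [])).getD c 0
      = pvZv matrix r c + (pvSR (matrix.getD r [])).getD (c+1) 0 := by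
  rw [pvSR_getD _ c (by rw [pv_rowlen matrix hp r hr]; exact hc)]
  rw [if_neg (show ¬(matrix.getD r []).getD c 0 = 1 from hM)]
  rfl

theorem pv_Bv_rec (matrix : List (List Int)) (_hp : Pre_preComputeNumberOfZeros matrix)
    (r c : Nat) (hr : r < matrix.length) (_hc : c < matrix.length) (hM : pvM matrix r c ≠ 1) :
    (pvSR (pvCol matrix c)).getD r 0
      = pvZv matrix r c + (pvSR (pvCol matrix c)).getD (r+1) 0 := by
  rw [pvSR_getD _ r (by rw [pv_col_length]; exact hr)]
  rw [pv_col_getD matrix r c hr, if_neg hM]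
  rfl

theorem pv_Rv_edge (matrix : List (List Int)) (hp : Pre_preComputeNumberOfZeros matrix)
    (r k : Nat) (hr : r < matrix.length) (hk : matrix.length ≤ k) :
    (pvSR (matrix.getD r [])).getD k 0 = 0 := by
  apply pv_getD_default
  rw [pvSR_length, pv_rowlen matrix hp r hr]; exact hk

theorem pv_Bv_edge (matrix : List (List Int)) (c k : Nat) (hk : matrix.length ≤ k) :
    (pvSR (pvCol matrix c)).getD k 0 = 0 := by
  apply pv_getD_default
  rw [pvSR_length, pv_col_length]; exact hk

theorem pvF_eq_base_of_one (matrix : List (List Int)) (hp : Pre_preComputeNumberOfZeros matrix)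
    (r c : Nat) (hr : r < matrix.length) (hc : c < matrix.length) (hM : pvM matrix r c = 1) :
    pvF matrix r c = pvBase matrix r c := by
  unfold pvF pvBase pvZv
  rw [pvSR_getD _ c (by rw [pv_rowlen matrix hp r hr]; exact hc)]
  rw [pvSR_getD _ r (by rw [pv_col_length]; exact hr)]
  rw [pv_col_getD matrix r c hr]
  have hM' : (matrix.getD r []).getD c 0 = 1 := hM
  rw [if_pos hM', if_pos (show pvM matrix r c = 1 from hM), if_neg (by rw [hM]; omega)]

theorem pv_stepB (matrix : List (List Int)) (_hp : Pre_preComputeNumberOfZeros matrix)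
    (G : pvGrid) (r c : Nat) (hr : r < matrix.length) (hc : c < matrix.length)
    (hG : pvGridIs matrix.length G (pvMixI matrix r (c+1))) :
    pvGridIs matrix.length (pvBody2B matrix matrix.length G r c)
      (fun i j => if r = i ∧ c = j then pvCellMid matrix r c else pvMixI matrix r (c+1) i j) := by
  have h3 := hG.2.2
  have hcell : (G.getD r []).getD c [] = pvBase matrix r c := by
    rw [h3 r c hr hc]; unfold pvMixI; rw [if_neg (by omega)]
  unfold pvBody2B
  by_cases hr1 : r < matrix.length - 1
  · rw [if_pos hr1]
    have hup : (G.getD (r+1) []).getD c [] = pvF matrix (r+1) c := by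
      rw [h3 (r+1) c (by omega) hc]; unfold pvMixI; rw [if_pos (by omega)]
    rw [hcell, hup]
    have hv : (PySem.Dict.insert (PySem.Dict.mk (pvBase matrix r c)) "numZerosBelow"
        (PySem.Dict.getD (PySem.Dict.mk (pvBase matrix r c)) "numZerosBelow" 0 +
         PySem.Dict.getD (PySem.Dict.mk (pvF matrix (r+1) c)) "numZerosBelow" 0)).items
        = pvCellMid matrix r c := by
      unfold pvBase pvF pvCellMid
      rw [pv_dict_getB, pv_dict_getB, pv_dict_insB]
    rw [hv]
    exact pvGridIs_set _ _ _ _ _ _ hG hr hc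
  · rw [if_neg hr1]
    apply pvGridIs_congr _ _ _ _ hG
    intro i j hi hj
    beta_reduce
    by_cases hij : r = i ∧ c = j
    · obtain ⟨rfl, rfl⟩ := hij
      rw [if_pos ⟨rfl, rfl⟩]
      unfold pvMixI
      rw [if_neg (by omega)]
      unfold pvCellMid pvBase
      rw [pv_Bv_edge matrix c (r+1) (by omega), add_zero]
    · rw [if_neg hij]

theorem pv_stepR (matrix : List (List Int)) (hp : Pre_preComputeNumberOfZeros matrix)
    (G : pvGrid) (r c : Nat) (hr : r < matrix.length) (_hc : c < matrix.length)
    (hG1 : pvGridIs matrix.length G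
      (fun i j => if r = i ∧ c = j then pvCellMid matrix r c else pvMixI matrix r (c+1) i j)) :
    pvGridIs matrix.length (pvBody2R matrix matrix.length G r c)
      (fun i j => if r = i ∧ c = j then pvCellFin matrix r c else pvMixI matrix r (c+1) i j) := by
  have h3 := hG1.2.2
  have hcell : (G.getD r []).getD c [] = pvCellMid matrix r c := by
    have h := h3 r c hr _hc
    beta_reduce at h
    rw [h, if_pos ⟨rfl, rfl⟩]
  unfold pvBody2R
  by_cases hc1 : c < matrix.length - 1
  · rw [if_pos hc1]
    have hrt : (G.getD r []).getD (c+1) [] = pvF matrix r (c+1) := by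
      have h := h3 r (c+1) hr (by omega)
      beta_reduce at h
      rw [h, if_neg (by omega)]
      unfold pvMixI; rw [if_pos (by omega)]
    rw [hcell, hrt]
    have hv : (PySem.Dict.insert (PySem.Dict.mk (pvCellMid matrix r c)) "numZerosRight"
        (PySem.Dict.getD (PySem.Dict.mk (pvCellMid matrix r c)) "numZerosRight" 0 +
         PySem.Dict.getD (PySem.Dict.mk (pvF matrix r (c+1))) "numZerosRight" 0)).items
        = pvCellFin matrix r c := by
      unfold pvCellMid pvF pvCellFin
      rw [pv_dict_getR, pv_dict_getR, pv_dict_insR]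
    rw [hv]
    have hset := pvGridIs_set _ _ _ r c (pvCellFin matrix r c) hG1 hr _hc
    apply pvGridIs_congr _ _ _ _ hset
    intro i j hi hj
    beta_reduce
    by_cases hij : r = i ∧ c = j
    · rw [if_pos hij, if_pos hij]
    · rw [if_neg hij, if_neg hij, if_neg hij]
  · rw [if_neg hc1]
    apply pvGridIs_congr _ _ _ _ hG1
    intro i j hi hj
    beta_reduce
    by_cases hij : r = i ∧ c = j
    · obtain ⟨rfl, rfl⟩ := hij
      rw [if_pos ⟨rfl, rfl⟩, if_pos ⟨rfl, rfl⟩]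
      unfold pvCellMid pvCellFin
      rw [pv_Rv_edge matrix hp r (c+1) hr (by omega), add_zero]
    · rw [if_neg hij, if_neg hij]

theorem pv_step2 (matrix : List (List Int)) (hp : Pre_preComputeNumberOfZeros matrix)
    (G : pvGrid) (r c : Nat) (hr : r < matrix.length) (hc : c < matrix.length)
    (hG : pvGridIs matrix.length G (pvMixI matrix r (c+1))) :
    pvGridIs matrix.length (pvBody2 matrix matrix.length G r c) (pvMixI matrix r c) := by
  unfold pvBody2
  by_cases hM : (matrix.getD r []).getD c 0 = 1
  · rw [if_pos hM]
    apply pvGridIs_congr _ _ _ _ hG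
    intro i j hi hj
    unfold pvMixI
    by_cases h1 : r < i ∨ (r = i ∧ c + 1 ≤ j)
    · rw [if_pos h1, if_pos (by omega)]
    · rw [if_neg h1]
      by_cases h2 : r < i ∨ (r = i ∧ c ≤ j)
      · obtain ⟨rfl, rfl⟩ : r = i ∧ c = j := by omega
        rw [if_pos h2]
        exact (pvF_eq_base_of_one matrix hp r c hr hc hM).symm
      · rw [if_neg h2]
  · rw [if_neg hM]
    have h1 := pv_stepB matrix hp G r c hr hc hG
    have h2 := pv_stepR matrix hp _ r c hr hc h1
    apply pvGridIs_congr _ _ _ _ h2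
    intro i j hi hj
    beta_reduce
    by_cases hij : r = i ∧ c = j
    · obtain ⟨rfl, rfl⟩ := hij
      rw [if_pos ⟨rfl, rfl⟩]
      unfold pvMixI
      rw [if_pos (by omega)]
      unfold pvCellFin pvF
      rw [pv_Rv_rec matrix hp r c hr hc hM, pv_Bv_rec matrix hp r c hr hc hM]
    · rw [if_neg hij]
      unfold pvMixI
      by_cases hA : r < i ∨ (r = i ∧ c + 1 ≤ j)
      · rw [if_pos hA, if_pos (by omega)]
      · rw [if_neg hA, if_neg (by omega)]

theorem pv_inner2 (matrix : List (List Int)) (hp : Pre_preComputeNumberOfZeros matrix)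
    (r : Nat) (hr : r < matrix.length) :
    ∀ (k c : Nat), c + k = matrix.length → ∀ G : pvGrid,
      pvGridIs matrix.length G (pvMixI matrix r matrix.length) →
      pvGridIs matrix.length
        ((List.range' c k).foldr (fun col info => pvBody2 matrix matrix.length info r col) G)
        (pvMixI matrix r c) := by
  intro k
  induction k with
  | zero =>
    intro c hc G hG
    obtain rfl : c = matrix.length := by omega
    simpa using hG
  | succ k ih =>
    intro c hc G hG
    rw [List.range'_succ, List.foldr_cons]
    exact pv_step2 matrix hp _ r c hr (by omega) (ih (c+1) (by omega) G hG)

theorem pv_outer2 (matrix : List (List Int)) (hp : Pre_preComputeNumberOfZeros matrix) :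
    ∀ (k a : Nat), a + k = matrix.length → ∀ G : pvGrid,
      pvGridIs matrix.length G (pvMixO matrix matrix.length) →
      pvGridIs matrix.length
        ((List.range' a k).foldr (fun row info =>
          ((List.range matrix.length).reverse).foldl
            (fun info col => pvBody2 matrix matrix.length info row col) info) G)
        (pvMixO matrix a) := by
  intro k
  induction k with
  | zero =>
    intro a ha G hG
    obtain rfl : a = matrix.length := by omega
    simpa using hG
  | succ k ih =>
    intro a ha G hG
    rw [List.range'_succ, List.foldr_cons, List.foldl_reverse]
    have hbase := pvGridIs_congr _ _ _ (pvMixI matrix a matrix.length) (ih (a+1) (by omega) G hG) (fun i j hi hj => by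
      unfold pvMixI pvMixO
      by_cases h : a + 1 ≤ i
      · rw [if_pos h, if_pos (by omega)]
      · rw [if_neg h, if_neg (by omega)])
    have hin := pv_inner2 matrix hp a (by omega) matrix.length 0 (by omega) _ hbase
    rw [← List.range_eq_range'] at hin
    apply pvGridIs_congr _ _ _ _ hin
    intro i j hi hj
    unfold pvMixI pvMixO
    by_cases h : a ≤ i
    · rw [if_pos (by omega), if_pos h]
    · rw [if_neg (by omega), if_neg h]

-- ---- assembling ----
theorem pv_grid_eq (n : Nat) (G : pvGrid) (f : Nat → Nat → List (String × Int))
    (hG : pvGridIs n G f) :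
    G = (List.range n).map (fun i => (List.range n).map (fun j => f i j)) := by
  obtain ⟨h1, h2, h3⟩ := hG
  apply List.ext_getElem (by simp [h1])
  intro i hi hi2
  have hin : i < n := h1 ▸ hi
  rw [List.getElem_map, List.getElem_range]
  have hrowlen : G[i].length = n := h2 _ (List.getElem_mem hi)
  apply List.ext_getElem (by simp [hrowlen])
  intro j hj hj2
  have hjn : j < n := hrowlen ▸ hj
  have := h3 i j hin hjn
  rw [List.getD_eq_getElem _ _ hi, List.getD_eq_getElem _ _ hj] at this
  simpa using this

theorem pvA_eq (matrix : List (List Int)) (hp : Pre_preComputeNumberOfZeros matrix) :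
    preComputeNumberOfZeros matrix
      = (List.range matrix.length).map (fun r =>
          (List.range matrix.length).map (fun c => pvF matrix r c)) := by
  unfold preComputeNumberOfZeros
  simp only [List.length_map]
  have hbase : pvGridIs matrix.length
      ((List.range matrix.length).foldl (fun info row =>
        (List.range matrix.length).foldl
          (fun info col => pvSetCell info row col (pvInitCell matrix row col)) info)
        (matrix.map (fun row => row.map (fun _ => ([] : List (String × Int))))))
      (pvMixO matrix matrix.length) := by
    apply pvGridIs_congr _ _ _ _ (pv_loop1 matrix matrix.length (List.range matrix.length)
      _ (by simp) ?_ (fun r hr => List.mem_range.mp hr))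
    · intro i j hi hj
      rw [if_pos (List.mem_range.mpr hi)]
      unfold pvMixO
      rw [if_neg (by omega)]
      rfl
    · intro row hrow
      obtain ⟨row0, hrow0, rfl⟩ := List.mem_map.mp hrow
      simpa using hp row0 hrow0
  have houter := pv_outer2 matrix hp matrix.length 0 (by omega) _ hbase
  rw [← List.range_eq_range'] at houter
  rw [List.foldl_reverse]
  rw [pv_grid_eq _ _ _ (pvGridIs_congr _ _ _ (fun i j => pvF matrix i j) houter
    (fun i j hi hj => by unfold pvMixO; rw [if_pos (by omega)]))]

theorem pvB_eq (matrix : List (List Int)) (hp : Pre_preComputeNumberOfZeros matrix) :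
    preComputeNumberOfZeros_alt matrix
      = (List.range matrix.length).map (fun r =>
          (List.range matrix.length).map (fun c => pvF matrix r c)) := by
  unfold preComputeNumberOfZeros_alt
  apply List.ext_getElem (by simp [PySem.List.length_enumerate])
  intro i hi hi2
  have hin : i < matrix.length := by simpa [PySem.List.length_enumerate] using hi
  rw [List.getElem_map, List.getElem_map, List.getElem_range, PySem.List.getElem_enumerate]
  have hrow : matrix[i].length = matrix.length := hp _ (List.getElem_mem _)
  apply List.ext_getElem (by simp [PySem.List.length_enumerate, hrow])
  intro j hj hj2
  have hjn : j < matrix.length := by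
    simpa [PySem.List.length_enumerate, hrow] using hj
  rw [List.getElem_map, List.getElem_map, List.getElem_range, PySem.List.getElem_enumerate]
  have hi0 : ((0 : Int) + (i : Int)).toNat = i := by omega
  have hj0 : ((0 : Int) + (j : Int)).toNat = j := by omega
  simp only [hi0, hj0]
  rw [pv_getD_map matrix (fun row => pvScan row) i [] [] hin]
  rw [pv_getD_map (List.range matrix.length)
        (fun c => pvScan (List.map (fun r => (matrix.getD r []).getD c 0) (List.range matrix.length)))
        j [] 0 (by simpa using hjn)]
  have hj0' : (List.range matrix.length).getD j 0 = j := by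
    rw [List.getD_eq_getElem _ _ (by simpa using hjn)]
    simp
  rw [hj0', pvScan_eq_sr, pvScan_eq_sr]
  rfl

-- ===== VERDICT (by name: the statement is the Claim_ definition above) =====
theorem preComputeNumberOfZeros_spec : Claim_equal_preComputeNumberOfZeros := by
  intro matrix _ hp
  unfold Spec_preComputeNumberOfZeros
  rw [pvA_eq matrix hp, pvB_eq matrix hp]
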